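-- pv_equiv track=rewrite | github.com/gzguevara/Complete-Programs | TicTacToe.py | five_in_line
-- ===== SOURCE A (Python) =====
-- def five_in_line(line, mark):
--
--     best = 0
--     cur_count = 0
--
--     for i in range(len(line)):
--
--         if line[i] == mark :
--             cur_count +=1
--             best = max(cur_count, best)
--
--         else:
--             cur_count = 0
--
--     return best >= 5
-- ===== SOURCE B (Python) =====
-- from itertools import groupby
--
--
-- def five_in_line(line, mark):
--     return any(key == mark and sum(1 for _ in group) >= 5
--                for key, group in groupby(line))
-- ===== Notes on version B (the rewrite author's own statement) =====
-- stated objective: idiomatic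
-- what changed: B partitions the line into maximal runs with itertools.groupby and asks for a mark-run of length >= 5, instead of threading a running counter and a best-so-far maximum through an index loop.
import Mathlib
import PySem

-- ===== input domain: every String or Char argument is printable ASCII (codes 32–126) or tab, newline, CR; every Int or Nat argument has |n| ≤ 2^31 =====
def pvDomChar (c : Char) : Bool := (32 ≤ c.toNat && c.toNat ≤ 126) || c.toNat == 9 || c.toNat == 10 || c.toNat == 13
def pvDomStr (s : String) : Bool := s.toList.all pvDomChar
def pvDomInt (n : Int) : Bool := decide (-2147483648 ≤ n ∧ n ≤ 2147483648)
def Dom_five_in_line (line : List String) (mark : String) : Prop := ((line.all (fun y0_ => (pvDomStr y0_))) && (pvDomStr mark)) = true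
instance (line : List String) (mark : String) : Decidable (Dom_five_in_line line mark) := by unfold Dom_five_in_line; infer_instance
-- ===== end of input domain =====

-- B replaces A's index loop with a running counter by a groupby-style run decomposition (idiomatic; same cost).

-- ===== PORT A =====
-- one loop step: if line[i] == mark then cur_count += 1; best = max(cur_count, best) else cur_count = 0
def pvStepA (mark : String) (s : Nat × Nat) (x : String) : Nat × Nat :=
  if x == mark then (max (s.2 + 1) s.1, s.2 + 1) else (s.1, 0)

def five_in_line (line : List String) (mark : String) : Bool :=
  decide (5 ≤ (line.foldl (pvStepA mark) (0, 0)).1)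

-- ===== PORT B =====
-- groupby(line): maximal runs of equal consecutive elements, as (key, length) pairs
def pvRunsAux (k : String) (n : Nat) : List String → List (String × Nat)
  | [] => [(k, n)]
  | x :: xs => if x == k then pvRunsAux k (n + 1) xs else (k, n) :: pvRunsAux x 1 xs

def pvRuns : List String → List (String × Nat)
  | [] => []
  | x :: xs => pvRunsAux x 1 xs

def five_in_line_alt (line : List String) (mark : String) : Bool :=
  (pvRuns line).any (fun g => g.1 == mark && decide (5 ≤ g.2))

-- ===== PRECONDITION & SPEC =====
def Spec_five_in_line (line : List String) (mark : String) (out : Bool) : Prop := out = five_in_line_alt line mark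
instance (line : List String) (mark : String) (out : Bool) : Decidable (Spec_five_in_line line mark out) := by unfold Spec_five_in_line; infer_instance

-- ===== CLAIM (what is proved, stated in full; the proofs are below) =====
def Claim_equal_five_in_line : Prop := ∀ (line : List String) (mark : String), Dom_five_in_line line mark → Spec_five_in_line line mark (five_in_line line mark)

-- ===== LEMMAS AND PROOFS =====

-- max mark-run length of the list, given a pending trailing mark-run of length cur
def pvM (mark : String) : List String → Nat → Nat
  | [], cur => cur
  | x :: xs, cur => if x == mark then pvM mark xs (cur + 1) else max cur (pvM mark xs 0)

theorem pvM_ge (mark : String) : ∀ (xs : List String) (cur : Nat), cur ≤ pvM mark xs cur := by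
  intro xs
  induction xs with
  | nil => intro cur; simp [pvM]
  | cons x xs ih =>
    intro cur
    simp only [pvM]
    split
    · exact le_trans (Nat.le_succ cur) (ih (cur + 1))
    · exact le_max_left _ _

theorem pvFoldA_eq (mark : String) : ∀ (xs : List String) (best cur : Nat), cur ≤ best →
    (xs.foldl (pvStepA mark) (best, cur)).1 = max best (pvM mark xs cur) := by
  intro xs
  induction xs with
  | nil => intro best cur h; simp [pvM]; omega
  | cons x xs ih =>
    intro best cur h
    simp only [List.foldl, pvStepA, pvM]
    split
    · rw [ih (max (cur + 1) best) (cur + 1) (le_max_left _ _)]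
      have := pvM_ge mark xs (cur + 1)
      omega
    · rw [ih best 0 (Nat.zero_le _)]
      omega

theorem pvRunsAux_any (mark : String) : ∀ (xs : List String) (k : String) (n : Nat),
    ((pvRunsAux k n xs).any (fun g => g.1 == mark && decide (5 ≤ g.2))) =
      (if k == mark then decide (5 ≤ pvM mark xs n) else decide (5 ≤ pvM mark xs 0)) := by
  intro xs
  induction xs with
  | nil =>
    intro k n
    simp only [pvRunsAux, pvM, List.any_cons, List.any_nil, Bool.or_false]
    by_cases hk : k = mark <;> simp [hk]
  | cons x xs ih =>
    intro k n
    by_cases hx : x = k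
    · simp only [pvRunsAux, hx, beq_self_eq_true, if_true, ih]
      by_cases hk : k = mark
      · simp [pvM, hk]
      · simp [pvM, hk]
    · simp only [pvRunsAux, show (x == k) = false by simp [hx], Bool.false_eq_true, if_false,
        List.any_cons, ih]
      by_cases hk : k = mark
      · have hxm : (x == mark) = false := by simp [hk ▸ hx]
        simp only [hk, beq_self_eq_true, if_true, Bool.true_and, hxm, Bool.false_eq_true, if_false,
          pvM]
        by_cases h5 : 5 ≤ n <;> by_cases h6 : 5 ≤ pvM mark xs 0 <;>
          first | (simp [h5, h6]; omega) | simp [h5, h6]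
      · have hkm : (k == mark) = false := by simp [hk]
        simp only [hkm, Bool.false_and, Bool.false_or, Bool.false_eq_true, if_false]
        by_cases hxm : x = mark
        · simp [pvM, hxm]
        · simp [pvM, show (x == mark) = false by simp [hxm]]

theorem five_in_line_eq (line : List String) (mark : String) :
    five_in_line line mark = five_in_line_alt line mark := by
  cases line with
  | nil => simp [five_in_line, five_in_line_alt, pvRuns]
  | cons x xs =>
    simp only [five_in_line, five_in_line_alt, pvRuns, List.foldl, pvStepA]
    rw [pvRunsAux_any]
    by_cases hx : x = mark
    · simp only [hx, beq_self_eq_true, if_true, Nat.zero_add, Nat.max_zero]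
      rw [pvFoldA_eq mark xs 1 1 (le_refl 1)]
      rw [decide_eq_decide]
      have := pvM_ge mark xs 1
      constructor <;> omega
    · have hne : (x == mark) = false := by simp [hx]
      simp only [hne, Bool.false_eq_true, if_false]
      rw [pvFoldA_eq mark xs 0 0 (le_refl 0)]
      rw [decide_eq_decide]
      simp

-- ===== VERDICT (by name: the statement is the Claim_ definition above) =====
theorem five_in_line_spec : Claim_equal_five_in_line := by
  intro line mark _
  exact five_in_line_eq line mark
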